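-- pv_equiv track=rewrite | github.com/RulZ-88/python-prueba | cositas🔯/probando_.py | validar_rut_v3
-- ===== SOURCE A (Python) =====
-- def validar_rut_v3(rut):
--     guion_encontrado = False
--     cuerpo = ""
--     verificador = ""
--
--     for char in rut:
--         if not guion_encontrado:
--             if char.isdigit():
--                 cuerpo += char
--             elif char == "-" and len(cuerpo) >= 7:
--                 guion_encontrado = True
--             else:
--                 return False
--         else:
--             verificador += char
--
--     # Validar condiciones finales
--     if len(cuerpo) < 7 or len(cuerpo) > 8:
--         return False
--     if len(verificador) != 1:
--         return False
--     if not (verificador.isdigit() or verificador.lower() == 'k'):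
--         return False
--
--     return True
-- ===== SOURCE B (Python) =====
-- def validar_rut_v3(rut):
--     idx = rut.find('-')
--     if idx == -1:
--         return False
--     cuerpo = rut[:idx]
--     verificador = rut[idx + 1:]
--     return (cuerpo.isdigit()
--             and 7 <= len(cuerpo) <= 8
--             and len(verificador) == 1
--             and (verificador.isdigit() or verificador.lower() == 'k'))
-- ===== Notes on version B (the rewrite author's own statement) =====
-- stated objective: idiomatic
-- what changed: A runs a character-by-character state machine with mutable flags and string accumulators; B splits the string once at the first dash (str.find plus two slices) and returns one conjunction of whole-string checks (isdigit, length bounds, verifier digit-or-k).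
import Mathlib
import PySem

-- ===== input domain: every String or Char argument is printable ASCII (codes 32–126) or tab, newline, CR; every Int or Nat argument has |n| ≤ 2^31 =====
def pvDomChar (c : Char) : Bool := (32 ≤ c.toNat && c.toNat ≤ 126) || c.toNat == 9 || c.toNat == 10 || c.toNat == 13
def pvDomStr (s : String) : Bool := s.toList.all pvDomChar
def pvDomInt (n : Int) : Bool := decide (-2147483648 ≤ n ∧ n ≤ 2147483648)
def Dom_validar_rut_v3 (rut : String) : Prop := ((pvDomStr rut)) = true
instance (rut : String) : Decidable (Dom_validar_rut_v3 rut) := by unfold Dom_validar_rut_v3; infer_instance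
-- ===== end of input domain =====

-- B replaces A's char-by-char state machine by a find-then-slice decomposition (idiomatic); same return value on every input.


-- ===== PORT A =====
-- the checks after A's loop ("Validar condiciones finales")
def validarA_final (cuerpo verificador : List Char) : Bool :=
  if cuerpo.length < 7 ∨ cuerpo.length > 8 then false
  else if verificador.length ≠ 1 then false
  else if ¬ (PySem.Chars.strIsdigit verificador = true ∨ PySem.Chars.lower verificador = ['k']) then false
  else true

-- A's for-loop: state (guion_encontrado, cuerpo, verificador); 'return False' = false
def validarA_loop : List Char → Bool → List Char → List Char → Bool
  | [], _, cuerpo, verificador => validarA_final cuerpo verificador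
  | c :: rest, guion, cuerpo, verificador =>
    if guion = false then
      if PySem.Chars.isdigit c then validarA_loop rest guion (cuerpo ++ [c]) verificador
      else if c = '-' ∧ cuerpo.length ≥ 7 then validarA_loop rest true cuerpo verificador
      else false
    else validarA_loop rest guion cuerpo (verificador ++ [c])

def validar_rut_v3 (rut : String) : Bool := validarA_loop rut.toList false [] []

-- ===== PORT B =====
def validar_rut_v3_alt (rut : String) : Bool :=
  let idx := PySem.Str.find rut "-"
  if idx = -1 then false
  else
    let cuerpo := PySem.Str.slice rut none (some idx)
    let verificador := PySem.Str.slice rut (some (idx + 1)) none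
    PySem.Str.strIsdigit cuerpo
      && decide (7 ≤ PySem.Str.len cuerpo) && decide (PySem.Str.len cuerpo ≤ 8)
      && decide (PySem.Str.len verificador = 1)
      && (PySem.Str.strIsdigit verificador || decide (PySem.Str.lower verificador = "k"))

-- ===== PRECONDITION & SPEC =====
def Spec_validar_rut_v3 (rut : String) (out : Bool) : Prop := out = validar_rut_v3_alt rut
instance (rut : String) (out : Bool) : Decidable (Spec_validar_rut_v3 rut out) := by unfold Spec_validar_rut_v3; infer_instance

-- ===== CLAIM (what is proved, stated in full; the proofs are below) =====
def Claim_equal_validar_rut_v3 : Prop := ∀ (rut : String), Dom_validar_rut_v3 rut → Spec_validar_rut_v3 rut (validar_rut_v3 rut)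

-- ===== LEMMAS AND PROOFS =====

-- without a dash A always returns False (a reject in the loop, or len(verificador) = 0 at the end)
lemma loop_no_dash (l : List Char) (c : List Char) (h : '-' ∉ l) :
    validarA_loop l false c [] = false := by
  induction l generalizing c with
  | nil =>
    show validarA_final c [] = false
    unfold validarA_final
    split_ifs with h1 h2 h3 <;> simp_all
  | cons a t ih =>
    have ha : a ≠ '-' := fun hh => h (hh ▸ List.mem_cons_self)
    have ht : '-' ∉ t := fun hh => h (List.mem_cons_of_mem _ hh)
    by_cases hd : PySem.Chars.isdigit a
    · simp [validarA_loop, hd, ih _ ht]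
    · simp [validarA_loop, hd, ha]

-- once the dash is found the rest of the string is appended to verificador
lemma loop_after_dash (l : List Char) (c v : List Char) :
    validarA_loop l true c v = validarA_final c (v ++ l) := by
  induction l generalizing v with
  | nil => simp [validarA_loop]
  | cons a t ih => simp [validarA_loop, ih (v ++ [a])]

-- the phase before the first dash
lemma loop_pre (pre : List Char) (post : List Char) (c : List Char) (h : '-' ∉ pre) :
    validarA_loop (pre ++ '-' :: post) false c [] =
      if pre.all PySem.Chars.isdigit then
        (if 7 ≤ (c ++ pre).length then validarA_final (c ++ pre) post else false)
      else false := by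
  induction pre generalizing c with
  | nil =>
    have hdig : PySem.Chars.isdigit '-' = false := rfl
    simp [validarA_loop, hdig, loop_after_dash]
  | cons a t ih =>
    have ha : a ≠ '-' := fun hh => h (hh ▸ List.mem_cons_self)
    have ht : '-' ∉ t := fun hh => h (List.mem_cons_of_mem _ hh)
    by_cases hd : PySem.Chars.isdigit a
    · have := ih (c ++ [a]) ht
      simp [validarA_loop, hd, this, List.append_assoc]
    · simp [validarA_loop, hd, ha]

-- decomposition at the first dash
lemma dash_decomp (l : List Char) (h : '-' ∈ l) :
    ∃ pre post, '-' ∉ pre ∧ l = pre ++ '-' :: post := by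
  induction l with
  | nil => cases h
  | cons a t ih =>
    by_cases ha : a = '-'
    · exact ⟨[], t, by simp, by simp [ha]⟩
    · have h' : '-' ∈ t := by
        cases h with
        | head => exact absurd rfl ha
        | tail _ hh => exact hh
      obtain ⟨p, q, hp, hq⟩ := ih h'
      refine ⟨a :: p, q, ?_, by simp [hq]⟩
      intro hmem
      rcases List.mem_cons.mp hmem with hh | hh
      · exact ha hh.symm
      · exact hp hh

-- str.find locates the first dash
lemma find_dash_eq (pre post : List Char) (h : '-' ∉ pre) :
    PySem.Chars.find (pre ++ '-' :: post) ['-'] = (pre.length : Int) := by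
  have hinf : ['-'] <:+: pre ++ '-' :: post := ⟨pre, post, by simp⟩
  have hnn : 0 ≤ PySem.Chars.find (pre ++ '-' :: post) ['-'] :=
    (PySem.Chars.find_nonneg_iff _ _).mpr hinf
  obtain ⟨hpref, hmin⟩ := PySem.Chars.find_spec hnn
  set k := (PySem.Chars.find (pre ++ '-' :: post) ['-']).toNat with hk
  have hkk : k = pre.length := by
    rcases Nat.lt_trichotomy k pre.length with hlt | heq | hgt
    · exfalso
      rcases hpref with ⟨t, htt⟩
      have h0 : (List.drop k (pre ++ '-' :: post))[0]? = some '-' := by rw [← htt]; rfl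
      rw [List.getElem?_drop] at h0
      simp only [Nat.add_zero] at h0
      rw [List.getElem?_append_left hlt] at h0
      exact h (List.mem_of_getElem? h0)
    · exact heq
    · exact absurd ⟨post, by simp⟩ (hmin pre.length hgt)
  omega

lemma find_no_dash (l : List Char) (h : '-' ∉ l) :
    PySem.Chars.find l ['-'] = -1 := by
  rw [PySem.Chars.find_eq_neg_one_iff]
  intro hinf
  exact h (hinf.subset (by simp))

-- B's checks on the decomposition rut = pre ++ '-' ++ post
lemma alt_decomp (rut : String) (pre post : List Char) (hpre : '-' ∉ pre)
    (hl : rut.toList = pre ++ '-' :: post) :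
    validar_rut_v3_alt rut =
      (PySem.Chars.strIsdigit pre && decide (7 ≤ pre.length) && decide (pre.length ≤ 8)
        && decide (post.length = 1)
        && (PySem.Chars.strIsdigit post || decide (PySem.Chars.lower post = ['k']))) := by
  have htl : ("-" : String).toList = ['-'] := rfl
  have hfind : PySem.Str.find rut "-" = (pre.length : Int) := by
    rw [PySem.Str.find_eq, htl, hl, find_dash_eq pre post hpre]
  have hcu : (PySem.Str.slice rut none (some (pre.length : Int))).toList = pre := by
    rw [PySem.Str.toList_slice, PySem.Chars.slice_eq_listSlice, hl, PySem.List.slice_to_natCast,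
      List.take_left]
  have hsplit : pre ++ '-' :: post = (pre ++ ['-']) ++ post := by simp
  have hve : (PySem.Str.slice rut (some ((pre.length : Int) + 1)) none).toList = post := by
    have hc : (pre.length : Int) + 1 = ((pre.length + 1 : Nat) : Int) := by push_cast; ring
    rw [PySem.Str.toList_slice, PySem.Chars.slice_eq_listSlice, hl, hc,
      PySem.List.slice_from_natCast, hsplit]
    have hlen : (pre ++ ['-']).length = pre.length + 1 := by simp
    rw [← hlen, List.drop_left]
  have e1 : decide ((7 : Int) ≤ (pre.length : Int)) = decide (7 ≤ pre.length) :=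
    decide_eq_decide.mpr (by omega)
  have e2 : decide ((pre.length : Int) ≤ 8) = decide (pre.length ≤ 8) :=
    decide_eq_decide.mpr (by omega)
  have e3 : decide ((post.length : Int) = 1) = decide (post.length = 1) :=
    decide_eq_decide.mpr (by omega)
  have e4 : decide (PySem.Str.lower (PySem.Str.slice rut (some ((pre.length : Int) + 1)) none) = "k")
      = decide (PySem.Chars.lower post = ['k']) := by
    refine decide_eq_decide.mpr ⟨fun hh => ?_, fun hh => ?_⟩
    · have := congrArg String.toList hh
      rwa [PySem.Str.toList_lower, hve] at this
    · apply String.toList_injective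
      rw [PySem.Str.toList_lower, hve, hh]
      rfl
  simp only [validar_rut_v3_alt, hfind]
  rw [if_neg (by omega : ¬ (pre.length : Int) = -1)]
  rw [PySem.Str.strIsdigit_eq, hcu, PySem.Str.strIsdigit_eq, hve,
    PySem.Str.len_eq, hcu, PySem.Str.len_eq, hve, e1, e2, e3, e4]

-- the length/emptiness bookkeeping of the two final checks agrees
lemma arith_bool (pre : List Char) :
    (decide (7 ≤ pre.length) && (!decide (pre.length < 7) && !decide (8 < pre.length)))
      = (!decide (pre = []) && decide (7 ≤ pre.length) && decide (pre.length ≤ 8)) := by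
  rcases Nat.lt_or_ge pre.length 7 with h | h
  · have a1 : ¬ 7 ≤ pre.length := by omega
    simp [a1, h]
  · have a1 : ¬ pre.length < 7 := by omega
    have a2 : pre ≠ [] := by intro hh; subst hh; simp at h
    rcases Nat.lt_or_ge 8 pre.length with h8 | h8
    · have a3 : ¬ pre.length ≤ 8 := by omega
      simp [h, a1, a2, h8, a3]
    · have a3 : ¬ 8 < pre.length := by omega
      simp [h, a1, a2, h8, a3]

-- A's validation on the decomposition equals B's conjunction of checks
lemma final_eq (pre post : List Char) :
    (if pre.all PySem.Chars.isdigit then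
        (if 7 ≤ pre.length then validarA_final pre post else false)
      else false)
    = (PySem.Chars.strIsdigit pre
        && decide (7 ≤ pre.length) && decide (pre.length ≤ 8)
        && decide (post.length = 1)
        && (PySem.Chars.strIsdigit post || decide (PySem.Chars.lower post = ['k']))) := by
  have hpre : PySem.Chars.strIsdigit pre = (!pre.isEmpty && pre.all PySem.Chars.isdigit) := by
    cases pre <;> simp [PySem.Chars.strIsdigit]
  have hne : pre.isEmpty = decide (pre.length = 0) := by cases pre <;> simp
  rw [hpre, hne]
  unfold validarA_final
  by_cases hall : pre.all PySem.Chars.isdigit <;>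
    by_cases hp1 : post.length = 1 <;>
      by_cases hd : PySem.Chars.strIsdigit post <;>
        by_cases hk : PySem.Chars.lower post = ['k'] <;>
          simp [hall, hp1, hd, hk] <;> exact arith_bool pre

-- the equivalence, per string
lemma main_eq (rut : String) : validar_rut_v3 rut = validar_rut_v3_alt rut := by
  by_cases hm : '-' ∈ rut.toList
  · obtain ⟨pre, post, hpre, hl⟩ := dash_decomp rut.toList hm
    rw [validar_rut_v3, hl, loop_pre pre post [] hpre, alt_decomp rut pre post hpre hl]
    simpa using final_eq pre post
  · have htl : ("-" : String).toList = ['-'] := rfl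
    have hfind2 := find_no_dash rut.toList hm
    rw [validar_rut_v3]
    rw [loop_no_dash rut.toList [] hm]
    simp [validar_rut_v3_alt, PySem.Str.find_eq, htl, hfind2]

-- ===== VERDICT (by name: the statement is the Claim_ definition above) =====
theorem validar_rut_v3_spec : Claim_equal_validar_rut_v3 := by
  intro rut _
  unfold Spec_validar_rut_v3
  exact main_eq rut
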